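-- pv_equiv track=rewrite | github.com/FB-18-19-PreAP-CS/wordplay-rachelh2071 | textreader.py | uses_only
-- ===== SOURCE A (Python) =====
-- def uses_only(word,str):
--     '''returns True if the word contains only letters from the given string
--
-- >>> uses_only('rrrrrr','radical')
-- True
-- >>> uses_only('radical','rrrrr')
-- False
-- >>> uses_only('rad','radical')
-- True
--
--
-- '''
--     count = 0
--     for i in range(len(word)):
--         if word[i].lower() in str:
--             count+=1
--     if count == len(word):
--         return True
--     else:
--         return False
-- ===== SOURCE B (Python) =====
-- def uses_only(word, str):
--     letters = {c.lower() for c in word}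
--     return letters <= set(str)
-- ===== Notes on version B (the rewrite author's own statement) =====
-- stated objective: idiomatic
-- what changed: Replaces the indexed loop that compares a running count of substring hits to len(word) by building the set of distinct lowered letters of word once and deciding via a single set-subset test against set(str).
import Mathlib
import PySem

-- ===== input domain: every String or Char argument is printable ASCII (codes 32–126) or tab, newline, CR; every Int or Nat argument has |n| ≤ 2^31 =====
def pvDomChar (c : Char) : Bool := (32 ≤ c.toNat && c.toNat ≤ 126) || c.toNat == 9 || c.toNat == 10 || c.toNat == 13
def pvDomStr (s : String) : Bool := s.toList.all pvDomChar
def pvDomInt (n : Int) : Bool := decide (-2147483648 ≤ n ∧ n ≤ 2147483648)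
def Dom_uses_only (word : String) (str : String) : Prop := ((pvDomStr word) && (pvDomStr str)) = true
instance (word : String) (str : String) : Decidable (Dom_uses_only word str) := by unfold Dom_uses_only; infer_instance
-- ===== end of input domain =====

-- B replaces A's per-character substring scan of str with one distinct-letter set and a subset test.
-- ===== PORT A =====
-- A: indexed loop counting letters of word whose lowercase occurs in str, then compares count to len(word)
def uses_only (word : String) (str : String) : Bool :=
  let count : Int :=
    (PySem.List.pyRange 0 (PySem.Str.len word) 1).foldl
      (fun count i =>
        if PySem.Str.isIn (String.ofList [PySem.Chars.lowerChar (PySem.List.pyGetD word.toList i ' ')]) str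
        then count + 1 else count) 0
  if count = PySem.Str.len word then true else false

-- ===== PORT B =====
-- B: the set of distinct lowered letters of word, decided by one subset test against set(str)
def uses_only_alt (word : String) (str : String) : Bool :=
  let letters : PySem.Set Char := PySem.Set.ofList (word.toList.map PySem.Chars.lowerChar)
  PySem.Set.issubset letters (PySem.Set.ofList str.toList)

-- ===== PRECONDITION & SPEC =====
def Spec_uses_only (word : String) (str : String) (out : Bool) : Prop := out = uses_only_alt word str
instance (word : String) (str : String) (out : Bool) : Decidable (Spec_uses_only word str out) := by unfold Spec_uses_only; infer_instance

-- ===== CLAIM (what is proved, stated in full; the proofs are below) =====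
def Claim_equal_uses_only : Prop := ∀ (word : String) (str : String), Dom_uses_only word str → Spec_uses_only word str (uses_only word str)

-- ===== LEMMAS AND PROOFS =====

-- Python's 'c in str' for a single character = list membership of that character
theorem isIn_singleton_iff (c : Char) (s : String) :
    PySem.Str.isIn (String.ofList [c]) s = true ↔ c ∈ s.toList := by
  rw [PySem.Str.isIn_iff_infix]
  constructor
  · intro h; exact h.mem (by simp)
  · intro h
    obtain ⟨l, r, hs⟩ := List.append_of_mem h
    exact ⟨l, r, by simp [hs]⟩

-- A's loop returns true iff every character of word has its lowercase in str
theorem uses_only_iff (word str : String) :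
    uses_only word str = true ↔
      ∀ c ∈ word.toList, PySem.Chars.lowerChar c ∈ str.toList := by
  unfold uses_only
  rw [show PySem.Str.len word = ((word.toList.length : Nat) : Int) from by
        simp [PySem.Str.len]]
  rw [PySem.List.foldl_pyRange_zero_pyGetD' word.toList ' '
        (fun (count : Int) c =>
          if PySem.Str.isIn (String.ofList [PySem.Chars.lowerChar c]) str then count + 1 else count) 0]
  rw [PySem.List.foldl_count_if]
  have key : ((0 + ((word.toList.countP
        (fun c => PySem.Str.isIn (String.ofList [PySem.Chars.lowerChar c]) str) : Nat) : Int))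
        = ((word.toList.length : Nat) : Int)) ↔
      ∀ c ∈ word.toList, PySem.Chars.lowerChar c ∈ str.toList := by
    rw [zero_add, Nat.cast_inj, List.countP_eq_length]
    exact forall₂_congr (fun c _ => isIn_singleton_iff _ str)
  rw [zero_add] at key
  simp only [zero_add]
  constructor
  · intro ht
    split_ifs at ht with hc
    exact key.mp hc
  · intro h
    rw [if_pos (key.mpr h)]

-- B returns true iff the same condition holds
theorem uses_only_alt_iff (word str : String) :
    uses_only_alt word str = true ↔
      ∀ c ∈ word.toList, PySem.Chars.lowerChar c ∈ str.toList := by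
  unfold uses_only_alt
  rw [PySem.Set.issubset_iff]
  simp [PySem.Set.mem_ofList]

-- ===== VERDICT (by name: the statement is the Claim_ definition above) =====
theorem uses_only_spec : Claim_equal_uses_only := by
  intro word str _
  unfold Spec_uses_only
  rw [Bool.eq_iff_iff, uses_only_iff, uses_only_alt_iff]
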